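-- pv_equiv track=rewrite | github.com/CSKIM999/Algorithm-test | 프로그래머스/3/12987. 숫자 게임/숫자 게임.py | solution
-- ===== SOURCE A (Python) =====
-- def solution(A, B):
--     answer = 0
--     A.sort()
--     B.sort()
--     ai = 0
--     bi = 0
--     while ai < len(A) and bi < len(B):
--         nowA, nowB = A[ai],B[bi]
--         if nowA < nowB:
--             answer += 1
--             ai += 1
--         bi += 1
--
--     return answer
-- ===== SOURCE B (Python) =====
-- def solution(A, B):
--     A.sort()
--     B.sort()
--     i = 0
--     best = 0
--     for j, b in enumerate(B):
--         while i < len(A) and A[i] < b: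
--             i += 1
--         d = j + 1 - i
--         if d > best:
--             best = d
--     return len(B) - best
-- ===== Notes on version B (the rewrite author's own statement) =====
-- stated objective: alternative
-- what changed: A simulates the greedy matching with two pointers; B never matches anything: it computes the Hall-deficiency statistic max_j((j+1) - #{a in A : a < sorted(B)[j]}) in one pass and returns len(B) minus that deficiency (floored at 0), which equals the maximum matching by Hall's theorem for the nested bipartite graph.
import Mathlib
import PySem

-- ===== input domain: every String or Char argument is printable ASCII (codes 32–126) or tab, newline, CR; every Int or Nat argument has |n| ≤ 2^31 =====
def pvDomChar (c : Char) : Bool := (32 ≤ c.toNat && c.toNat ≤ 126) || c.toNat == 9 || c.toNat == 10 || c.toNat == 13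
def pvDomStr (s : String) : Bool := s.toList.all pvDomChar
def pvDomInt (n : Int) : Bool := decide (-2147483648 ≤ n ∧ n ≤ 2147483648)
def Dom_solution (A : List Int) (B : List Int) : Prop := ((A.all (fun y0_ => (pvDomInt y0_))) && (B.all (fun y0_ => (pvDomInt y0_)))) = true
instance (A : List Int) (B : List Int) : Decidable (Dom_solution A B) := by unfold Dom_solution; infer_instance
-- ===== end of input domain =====

-- B replaces A's greedy two-pointer matching by a Hall-deficiency computation (len(B) minus the
-- worst prefix shortfall of strictly-smaller A elements); both Pythons sort their arguments in
-- place, and the equivalence proved here is about the RETURN value only.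

-- ===== PORT A =====
-- while ai < len(A) and bi < len(B): if A[ai] < B[bi]: answer += 1; ai += 1;  bi += 1
-- fuel is a totality guard only: bi increases every iteration, so sB.length steps always suffice
def loopA (sA sB : List Int) : Nat → Nat → Nat → Int → Int
  | 0, _, _, answer => answer
  | fuel + 1, ai, bi, answer =>
    if ai < sA.length ∧ bi < sB.length then
      if sA.getD ai 0 < sB.getD bi 0 then loopA sA sB fuel (ai + 1) (bi + 1) (answer + 1)
      else loopA sA sB fuel ai (bi + 1) answer
    else answer

def solution (A : List Int) (B : List Int) : Int :=
  let sB := PySem.List.sorted B (fun x => x) false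
  loopA (PySem.List.sorted A (fun x => x) false) sB sB.length 0 0 0

-- ===== PORT B =====
-- while i < len(A) and A[i] < b: i += 1    (fuel = len(A) always suffices: i stops at len(A))
def advB (sA : List Int) (b : Int) : Nat → Nat → Nat
  | 0, i => i
  | fuel + 1, i =>
    if i < sA.length ∧ sA.getD i 0 < b then advB sA b fuel (i + 1) else i

-- for j, b in enumerate(B): advance i; d = j + 1 - i; if d > best: best = d
def loopJ (sA : List Int) : List Int → Nat → Nat → Int → Int
  | [], _, _, best => best
  | b :: bs, j, i, best =>
    let i' := advB sA b sA.length i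
    let d : Int := (j : Int) + 1 - (i' : Int)
    loopJ sA bs (j + 1) i' (if d > best then d else best)

def solution_alt (A : List Int) (B : List Int) : Int :=
  let sA := PySem.List.sorted A (fun x => x) false
  let sB := PySem.List.sorted B (fun x => x) false
  (sB.length : Int) - loopJ sA sB 0 0 0

-- ===== PRECONDITION & SPEC =====
def Spec_solution (A : List Int) (B : List Int) (out : Int) : Prop := out = solution_alt A B
instance (A : List Int) (B : List Int) (out : Int) : Decidable (Spec_solution A B out) := by unfold Spec_solution; infer_instance

-- ===== CLAIM (what is proved, stated in full; the proofs are below) =====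
def Claim_equal_solution : Prop := ∀ (A : List Int) (B : List Int), Dom_solution A B → Spec_solution A B (solution A B)

-- ===== LEMMAS AND PROOFS =====

-- Clean recursive form of A's greedy loop.
def low : List Int → List Int → Int
  | [], _ => 0
  | _, [] => 0
  | a :: as, b :: bs => if a < b then low as bs + 1 else low (a :: as) bs

-- Hall prefix deficiency, in merge-recursion form.
def Dm : List Int → List Int → Int
  | _, [] => 0
  | [], bs => (bs.length : Int)
  | a :: as, b :: bs => if a < b then Dm as bs else Dm (a :: as) bs + 1

-- number of elements of as strictly below b
def cnt (as : List Int) (b : Int) : Nat := as.countP (fun x => decide (x < b))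

-- the deficiency terms (j'+1) - cnt as bs[j'-j], j' = j, j+1, …
def terms (as : List Int) : List Int → Nat → List Int
  | [], _ => []
  | b :: bs, j => ((j : Int) + 1 - (cnt as b : Int)) :: terms as bs (j + 1)

theorem low_nil_right (as : List Int) : low as [] = 0 := by cases as <;> simp [low]
theorem Dm_nil_right (as : List Int) : Dm as [] = 0 := by cases as <;> simp [Dm]

theorem Dm_nonneg : ∀ (bs as : List Int), 0 ≤ Dm as bs := by
  intro bs
  induction bs with
  | nil => intro as; simp [Dm_nil_right]
  | cons b bs ih =>
    intro as
    cases as with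
    | nil => simp [Dm]; omega
    | cons a as =>
      by_cases h : a < b
      · simpa [Dm, h] using ih as
      · have := ih (a :: as); simp [Dm, h]; omega

-- A's greedy count equals |B| minus the Hall deficiency (purely structural, no sortedness needed).
theorem low_eq_len_sub_Dm : ∀ (bs as : List Int), low as bs = (bs.length : Int) - Dm as bs := by
  intro bs
  induction bs with
  | nil => intro as; simp [low_nil_right, Dm_nil_right]
  | cons b bs ih =>
    intro as
    cases as with
    | nil => simp [low, Dm]
    | cons a as =>
      by_cases h : a < b
      · have := ih as; simp [low, Dm, h]; omega
      · have := ih (a :: as); simp [low, Dm, h]; omega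

theorem cnt_le_len (as : List Int) (b : Int) : cnt as b ≤ as.length :=
  List.countP_le_length

theorem cnt_mono (as : List Int) {b b' : Int} (h : b ≤ b') : cnt as b ≤ cnt as b' := by
  unfold cnt
  apply List.countP_mono_left
  intro x _ hx
  simp only [decide_eq_true_eq] at *
  omega

theorem cnt_eq_zero (a : Int) (as : List Int) (hs : (a :: as).Pairwise (· ≤ ·)) {b : Int}
    (hb : ¬ a < b) : cnt (a :: as) b = 0 := by
  unfold cnt
  rw [List.countP_eq_zero]
  intro x hx
  simp only [decide_eq_true_eq, not_lt]
  rcases List.mem_cons.mp hx with rfl | hx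
  · omega
  · have := (List.pairwise_cons.mp hs).1 x hx
    omega

theorem cnt_cons_lt (a : Int) (as : List Int) {b : Int} (h : a < b) :
    cnt (a :: as) b = cnt as b + 1 := by
  simp [cnt, h]

-- on a sorted list, indices below cnt hold elements < b …
theorem sorted_getD_lt : ∀ (as : List Int), as.Pairwise (· ≤ ·) → ∀ {b : Int} (i : Nat),
    i < cnt as b → as.getD i 0 < b := by
  intro as
  induction as with
  | nil => intro _ b i h; simp [cnt] at h
  | cons a as ih =>
    intro hs b i h
    by_cases ha : a < b
    · cases i with
      | zero => simpa using ha
      | succ i =>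
        rw [cnt_cons_lt a as ha] at h
        simpa using ih (List.pairwise_cons.mp hs).2 i (by omega)
    · rw [cnt_eq_zero a as hs ha] at h; omega

-- … and the element at index cnt (if any) is not < b.
theorem sorted_getD_cnt : ∀ (as : List Int), as.Pairwise (· ≤ ·) → ∀ {b : Int},
    cnt as b < as.length → ¬ as.getD (cnt as b) 0 < b := by
  intro as
  induction as with
  | nil => intro _ b h; simp at h
  | cons a as ih =>
    intro hs b h
    by_cases ha : a < b
    · rw [cnt_cons_lt a as ha] at h ⊢
      simpa using ih (List.pairwise_cons.mp hs).2 (by simpa using h)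
    · rw [cnt_eq_zero a as hs ha]; simpa using ha

-- the while loop lands exactly on cnt sA b
theorem advB_eq (sA : List Int) (hs : sA.Pairwise (· ≤ ·)) (b : Int) :
    ∀ (fuel i : Nat), i ≤ cnt sA b → cnt sA b - i ≤ fuel → advB sA b fuel i = cnt sA b := by
  intro fuel
  induction fuel with
  | zero =>
    intro i h1 h2
    have : i = cnt sA b := by omega
    simp [advB, this]
  | succ fuel ih =>
    intro i h1 h2
    by_cases hi : i = cnt sA b
    · subst hi
      rw [advB]
      by_cases hl : cnt sA b < sA.length
      · rw [if_neg]; push Not; intro _; exact not_lt.mp (sorted_getD_cnt sA hs hl)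
      · rw [if_neg]; push Not; intro h; omega
    · have hlt : i < cnt sA b := by omega
      rw [advB, if_pos ⟨lt_of_lt_of_le hlt (cnt_le_len sA b), sorted_getD_lt sA hs i hlt⟩]
      exact ih (i + 1) (by omega) (by omega)

-- peeling a head of A that beats everything in bs shifts the deficiency terms
theorem terms_cons_of_lt (a : Int) (as : List Int) :
    ∀ (bs : List Int) (j : Nat), (∀ x ∈ bs, a < x) →
      terms (a :: as) bs (j + 1) = terms as bs j := by
  intro bs
  induction bs with
  | nil => intro j _; simp [terms]
  | cons b bs ih =>
    intro j hb
    rw [terms, terms, cnt_cons_lt a as (hb b (by simp)),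
      ih (j + 1) (fun x hx => hb x (by simp [hx]))]
    push_cast
    ring_nf

theorem terms_shift (as : List Int) :
    ∀ (bs : List Int) (j : Nat), terms as bs (j + 1) = (terms as bs j).map (· + 1) := by
  intro bs
  induction bs with
  | nil => intro j; simp [terms]
  | cons b bs ih =>
    intro j
    rw [terms, terms, List.map_cons, ih (j + 1)]
    congr 1
    push_cast
    ring

theorem foldl_max_map_add (l : List Int) : ∀ (c : Int),
    List.foldl max c (l.map (· + 1)) = List.foldl max (c - 1) l + 1 := by
  induction l with
  | nil => intro c; simp
  | cons x l ih =>
    intro c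
    simp only [List.map_cons, List.foldl_cons]
    rw [ih (max c (x + 1))]
    have h : max c (x + 1) - 1 = max (c - 1) x := by omega
    rw [h]

-- B's scan is a running max of the deficiency terms
theorem loopJ_eq (sA : List Int) (hsA : sA.Pairwise (· ≤ ·)) :
    ∀ (bs : List Int), bs.Pairwise (· ≤ ·) → ∀ (j i : Nat) (best : Int),
      (∀ b ∈ bs, i ≤ cnt sA b) →
      loopJ sA bs j i best = List.foldl max best (terms sA bs j) := by
  intro bs
  induction bs with
  | nil => intro _ j i best _; simp [loopJ, terms]
  | cons b bs ih =>
    intro hsb j i best hi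
    have hadv : advB sA b sA.length i = cnt sA b :=
      advB_eq sA hsA b sA.length i (hi b (by simp))
        (by have := cnt_le_len sA b; omega)
    rw [loopJ, terms, List.foldl_cons]
    simp only [hadv]
    have hmax : (if (j : Int) + 1 - (cnt sA b : Int) > best then (j : Int) + 1 - (cnt sA b : Int)
        else best) = max best ((j : Int) + 1 - (cnt sA b : Int)) := by
      rcases le_or_gt ((j : Int) + 1 - (cnt sA b : Int)) best with h | h
      · rw [if_neg (by omega)]; omega
      · rw [if_pos h]; omega
    rw [hmax]
    exact ih (List.pairwise_cons.mp hsb).2 (j + 1) (cnt sA b) _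
      (fun b' hb' => cnt_mono sA ((List.pairwise_cons.mp hsb).1 b' hb'))

-- the running max of the deficiency terms is the merge-form Hall deficiency
theorem foldl_terms_eq_Dm : ∀ (bs as : List Int), as.Pairwise (· ≤ ·) → bs.Pairwise (· ≤ ·) →
    ∀ (c : Int), 0 ≤ c → List.foldl max c (terms as bs 0) = max c (Dm as bs) := by
  intro bs
  induction bs with
  | nil => intro as _ _ c hc; simp [terms, Dm_nil_right]; omega
  | cons b bs ih =>
    intro as hsa hsb c hc
    cases as with
    | nil =>
      have hc0 : cnt ([] : List Int) b = 0 := by simp [cnt]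
      rw [terms, List.foldl_cons, terms_shift, foldl_max_map_add,
        ih [] (by simp) (List.pairwise_cons.mp hsb).2
          (max c (((0 : Nat) : Int) + 1 - (cnt ([] : List Int) b : Int)) - 1)
          (by rw [hc0]; push_cast; omega)]
      have h1 : Dm [] (b :: bs) = ((b :: bs).length : Int) := rfl
      have h2 : Dm [] bs = (bs.length : Int) := by cases bs <;> rfl
      rw [h1, h2, hc0]
      simp only [List.length_cons]
      push_cast
      omega
    | cons a as =>
      by_cases h : a < b
      · have hbs : ∀ x ∈ bs, a < x := fun x hx =>
          lt_of_lt_of_le h ((List.pairwise_cons.mp hsb).1 x hx)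
        rw [terms, List.foldl_cons, terms_cons_of_lt a as bs 0 hbs, cnt_cons_lt a as h]
        have ht : max c ((0 : Nat) + 1 - ((cnt as b + 1 : Nat) : Int)) = c := by
          push_cast; omega
        rw [ht, ih as (List.pairwise_cons.mp hsa).2 (List.pairwise_cons.mp hsb).2 c hc]
        simp [Dm, h]
      · rw [terms, List.foldl_cons, cnt_eq_zero a as hsa h, terms_shift, foldl_max_map_add,
          ih (a :: as) hsa (List.pairwise_cons.mp hsb).2 _ (by push_cast; omega)]
        have hD := Dm_nonneg bs (a :: as)
        simp only [Dm, if_neg h]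
        push_cast
        omega

theorem loopA_eq (sA sB : List Int) : ∀ (fuel ai bi : Nat) (ans : Int),
    sB.length - bi ≤ fuel → ai ≤ sA.length → bi ≤ sB.length →
    loopA sA sB fuel ai bi ans = ans + low (sA.drop ai) (sB.drop bi) := by
  intro fuel
  induction fuel with
  | zero =>
    intro ai bi ans hf ha hb
    have hbi : bi = sB.length := by omega
    simp [loopA, hbi, low_nil_right]
  | succ fuel ih =>
    intro ai bi ans hf ha hb
    by_cases hc : ai < sA.length ∧ bi < sB.length
    · rw [loopA, if_pos hc]
      have hda : sA.drop ai = sA[ai] :: sA.drop (ai + 1) := by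
        rw [List.getElem_cons_drop]
      have hdb : sB.drop bi = sB[bi] :: sB.drop (bi + 1) := by
        rw [List.getElem_cons_drop]
      rw [List.getD_eq_getElem sA 0 hc.1, List.getD_eq_getElem sB 0 hc.2, hda, hdb, low]
      by_cases hlt : sA[ai] < sB[bi]
      · rw [if_pos hlt, if_pos hlt, ih (ai + 1) (bi + 1) (ans + 1) (by omega) (by omega) (by omega)]
        ring
      · rw [if_neg hlt, if_neg hlt, ih ai (bi + 1) ans (by omega) (by omega) (by omega), hda]
    · rw [loopA, if_neg hc]
      rcases (by omega : ai = sA.length ∨ bi = sB.length) with h | h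
      · simp [h, low]
      · simp [h, low_nil_right]

theorem solution_eq_low (A B : List Int) :
    solution A B = low (PySem.List.sorted A (fun x => x) false) (PySem.List.sorted B (fun x => x) false) := by
  unfold solution
  rw [loopA_eq _ _ (PySem.List.sorted B (fun x => x) false).length 0 0 0 (by omega) (by omega) (by omega)]
  simp

-- ===== VERDICT (by name: the statement is the Claim_ definition above) =====
theorem solution_spec : Claim_equal_solution := by
  intro A B _
  unfold Spec_solution solution_alt
  have hsa : (PySem.List.sorted A (fun x => x) false).Pairwise (· ≤ ·) :=
    (PySem.List.sorted_pairwise A (fun x => x) : _)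
  have hsb : (PySem.List.sorted B (fun x => x) false).Pairwise (· ≤ ·) :=
    (PySem.List.sorted_pairwise B (fun x => x) : _)
  rw [solution_eq_low,
    low_eq_len_sub_Dm (PySem.List.sorted B (fun x => x) false) (PySem.List.sorted A (fun x => x) false)]
  simp only
  rw [loopJ_eq _ hsa _ hsb 0 0 0 (fun b _ => Nat.zero_le _),
    foldl_terms_eq_Dm _ _ hsa hsb 0 le_rfl]
  have := Dm_nonneg (PySem.List.sorted B (fun x => x) false) (PySem.List.sorted A (fun x => x) false)
  omega
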